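-- pv_equiv track=rewrite | github.com/PiErr0r/aoc | 2020/24.py | parse
-- ===== SOURCE A (Python) =====
-- def parse(d):
-- 	ret = []
-- 	for i, tile in enumerate(d):
-- 		j = 0
-- 		tile_p = []
-- 		while j < len(tile):
-- 			if tile[j] in ['e', 'w']:
-- 				tile_p.append(tile[j])
-- 				j += 1
-- 			else:
-- 				tile_p.append(tile[j:j+2])
-- 				j += 2
-- 		ret.append(tile_p[::])
-- 	return ret
-- ===== SOURCE B (Python) =====
-- def parse(d):
--     return [_tokens(tile) for tile in d]
--
-- def _tokens(tile):
--     # iterator-driven single pass: pair each non-e/w char with the next char (if any)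
--     it = iter(tile)
--     out = []
--     for c in it:
--         out.append(c if c in 'ew' else c + next(it, ''))
--     return out
-- ===== Notes on version B (the rewrite author's own statement) =====
-- stated objective: idiomatic
-- what changed: Replaces A's index-pointer while loop with slicing by an iterator-driven single pass that pairs each non-'e'/'w' character with the next character via next(it, ''), building each row with a list comprehension.
import Mathlib
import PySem

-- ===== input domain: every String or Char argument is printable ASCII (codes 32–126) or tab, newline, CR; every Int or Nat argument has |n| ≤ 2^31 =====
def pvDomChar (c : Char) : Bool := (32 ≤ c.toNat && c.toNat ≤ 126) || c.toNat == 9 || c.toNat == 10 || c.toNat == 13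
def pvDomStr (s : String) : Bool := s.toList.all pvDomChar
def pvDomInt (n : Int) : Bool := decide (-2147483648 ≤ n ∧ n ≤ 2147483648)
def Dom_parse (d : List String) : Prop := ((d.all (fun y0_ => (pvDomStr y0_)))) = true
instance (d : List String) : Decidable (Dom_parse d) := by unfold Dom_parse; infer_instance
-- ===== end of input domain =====

-- B replaces A's index-pointer while loop by an iterator-driven single pass that pairs each
-- non-'e'/'w' character with its successor (objective: idiomatic; same cost).

-- ===== PORT A =====
-- inner 'while j < len(tile)' loop of A; tile[j] is in range under the guard (exact there),
-- tile[j:j+2] is PySem.List.slice on the code points (exact)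
def parseLoopA (s : List Char) (j : Nat) (acc : List String) : List String :=
  if h : j < s.length then
    if s[j] = 'e' ∨ s[j] = 'w' then
      parseLoopA s (j + 1) (acc ++ [String.ofList [s[j]]])
    else
      parseLoopA s (j + 2) (acc ++ [String.ofList (PySem.List.slice s (some (j : Int)) (some ((j : Int) + 2)))])
  else acc
termination_by s.length - j

def parse (d : List String) : List (List String) :=
  d.foldl (fun ret tile => ret ++ [parseLoopA tile.toList 0 []]) []

-- ===== PORT B =====
-- 'for c in it: out.append(c if c in 'ew' else c + next(it, ''))' as structural recursion on the chars
def tokensB : List Char → List String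
  | [] => []
  | c :: rest =>
    if c = 'e' ∨ c = 'w' then String.ofList [c] :: tokensB rest
    else
      match rest with
      | [] => [String.ofList [c]]          -- next(it, '') = '' : token is c
      | c2 :: rest2 => String.ofList [c, c2] :: tokensB rest2

def parse_alt (d : List String) : List (List String) :=
  d.map (fun tile => tokensB tile.toList)

-- ===== PRECONDITION & SPEC =====
def Spec_parse (d : List String) (out : List (List String)) : Prop := out = parse_alt d
instance (d : List String) (out : List (List String)) : Decidable (Spec_parse d out) := by unfold Spec_parse; infer_instance

-- ===== CLAIM (what is proved, stated in full; the proofs are below) =====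
def Claim_equal_parse : Prop := ∀ (d : List String), Dom_parse d → Spec_parse d (parse d)

-- ===== LEMMAS AND PROOFS =====

lemma parseLoopA_eq_tokensB (s : List Char) (j : Nat) (acc : List String) :
    parseLoopA s j acc = acc ++ tokensB (s.drop j) := by
  fun_induction parseLoopA s j acc with
  | case1 j acc h hew ih =>
    have hdrop : s.drop j = s[j] :: s.drop (j + 1) := List.drop_eq_getElem_cons h
    rw [ih]
    conv_rhs => rw [hdrop, tokensB.eq_def]
    simp [hew]
  | case2 j acc h hew ih =>
    have hdrop : s.drop j = s[j] :: s.drop (j + 1) := List.drop_eq_getElem_cons h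
    rw [ih]
    conv_rhs => rw [hdrop, tokensB.eq_def]
    have hsl : PySem.List.slice s (some (j : Int)) (some ((j : Int) + 2)) = (s.drop j).take 2 := by
      have := PySem.List.slice_natCast_add (xs := s) (j := j) (n := 2)
      simpa using this
    by_cases h2 : j + 1 < s.length
    · have hdrop2 : s.drop (j + 1) = s[j+1] :: s.drop (j + 2) := List.drop_eq_getElem_cons h2
      rw [hdrop2, hsl, hdrop, hdrop2]
      simp [hew]
      rw [hdrop, hdrop2, List.take_succ_cons, List.take_succ_cons, List.take_zero]
    · have hnil : s.drop (j + 1) = [] := List.drop_eq_nil_of_le (Nat.le_of_not_lt h2)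
      have hnil2 : s.drop (j + 2) = [] := List.drop_eq_nil_of_le (by omega)
      simp [hew, hsl, hdrop, hnil, hnil2, tokensB]
  | case3 j acc h => simp [List.drop_eq_nil_of_le (Nat.le_of_not_lt h), tokensB]

lemma foldl_append_map (d : List String) (acc : List (List String)) :
    d.foldl (fun ret tile => ret ++ [parseLoopA tile.toList 0 []]) acc
      = acc ++ d.map (fun tile => tokensB tile.toList) := by
  induction d generalizing acc with
  | nil => simp
  | cons t ts ih => rw [List.foldl_cons, ih]; simp [parseLoopA_eq_tokensB]

-- ===== VERDICT (by name: the statement is the Claim_ definition above) =====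
theorem parse_spec : Claim_equal_parse := by
  intro d _
  unfold Spec_parse parse parse_alt
  simpa using foldl_append_map d []
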